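-- pv_equiv track=rewrite | github.com/pworth1971/kairos | DARPA/THEIA_E3/theia3_datapreprocess.py | path_to_hierarchy
-- ===== SOURCE A (Python) =====
-- from typing import Dict, List, Tuple, Iterable
--
-- def path_to_hierarchy(p: str, sep: str = '/') -> List[str]:
--     parts = [x for x in p.strip().split(sep) if x]
--     out = []
--     for i, part in enumerate(parts):
--         if i == 0:
--             out.append(part)
--         else:
--             out.append(out[-1] + sep + part)
--     return out
-- ===== SOURCE B (Python) =====
-- def path_to_hierarchy(p: str, sep: str = '/') -> list:
--     parts = [x for x in p.strip().split(sep) if x]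
--     return [sep.join(parts[:i + 1]) for i in range(len(parts))]
-- ===== Notes on version B (the rewrite author's own statement) =====
-- stated objective: simpler
-- what changed: B drops A's running accumulator (each prefix built by appending to the previous output element) and instead rebuilds every prefix independently by joining a growing slice of the parts list in a single comprehension.
import Mathlib
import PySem

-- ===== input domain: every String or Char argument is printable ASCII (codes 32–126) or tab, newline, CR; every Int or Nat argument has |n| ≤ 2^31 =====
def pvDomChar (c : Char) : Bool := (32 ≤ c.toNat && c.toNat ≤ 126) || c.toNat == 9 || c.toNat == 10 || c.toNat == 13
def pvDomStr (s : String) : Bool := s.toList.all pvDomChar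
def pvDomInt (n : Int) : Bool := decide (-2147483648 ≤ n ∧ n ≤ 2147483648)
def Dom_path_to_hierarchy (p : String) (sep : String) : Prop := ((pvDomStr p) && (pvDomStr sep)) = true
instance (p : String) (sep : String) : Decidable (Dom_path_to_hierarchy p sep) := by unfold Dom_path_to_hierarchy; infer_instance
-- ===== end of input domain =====

-- B rebuilds every cumulative prefix by joining a growing slice of the parts list, instead of
-- A's running accumulator that extends the previous output element (objective: simpler).

-- ===== PORT A =====
-- Literal port of A, computed on code-point lists (PySem.Str.* are thin wrappers over PySem.Chars.*;
-- '+' on Python str is exactly List.append on code points). 'out[-1]' is PySem.List.pyGet? out (-1);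
-- its '.getD []' default is never reached: in the i ≠ 0 branch out is nonempty (i elements so far).
def path_to_hierarchy (p : String) (sep : String) : List String :=
  let parts : List (List Char) :=
    ((PySem.Chars.split? (PySem.Chars.strip p.toList) sep.toList).getD []).filter
      (fun x => !x.isEmpty)
  let out : List (List Char) :=
    (PySem.List.enumerate parts).foldl
      (fun out ip =>
        if ip.1 = 0 then out ++ [ip.2]
        else out ++ [((PySem.List.pyGet? out (-1)).getD []) ++ sep.toList ++ ip.2]) []
  out.map String.ofList

-- ===== PORT B =====
def path_to_hierarchy_alt (p : String) (sep : String) : List String :=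
  let parts : List (List Char) :=
    ((PySem.Chars.split? (PySem.Chars.strip p.toList) sep.toList).getD []).filter
      (fun x => !x.isEmpty)
  (PySem.List.pyRange 0 (parts.length : Int) 1).map
    (fun i => String.ofList
      (PySem.Chars.join sep.toList (PySem.List.slice parts none (some (i + 1)))))

-- ===== PRECONDITION & SPEC =====
-- Both A and B raise ValueError when the separator is the empty string (str.split rejects it); Pre_ excludes that.
def Pre_path_to_hierarchy (_p : String) (sep : String) : Prop := sep ≠ ""
instance (p : String) (sep : String) : Decidable (Pre_path_to_hierarchy p sep) := by
  unfold Pre_path_to_hierarchy; infer_instance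

def pvWitness_path_to_hierarchy : String × String := (" /usr/local/bin ", "/")

def Spec_path_to_hierarchy (p : String) (sep : String) (out : List String) : Prop :=
  out = path_to_hierarchy_alt p sep
instance (p : String) (sep : String) (out : List String) :
    Decidable (Spec_path_to_hierarchy p sep out) := by
  unfold Spec_path_to_hierarchy; infer_instance

-- ===== CLAIM (what is proved, stated in full; the proofs are below) =====
def Claim_equal_path_to_hierarchy : Prop :=
  ∀ (p : String) (sep : String), Dom_path_to_hierarchy p sep →
    Pre_path_to_hierarchy p sep →
      Spec_path_to_hierarchy p sep (path_to_hierarchy p sep)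

-- ===== LEMMAS AND PROOFS =====

-- The common value: cumulative prefixes of `xs`, each extended on the left by the prefix built so far.
def pvPrefixes (s : List Char) (pre : List Char) : List (List Char) → List (List Char)
  | [] => []
  | x :: xs => (pre ++ x) :: pvPrefixes s (pre ++ x ++ s) xs

theorem pvPyGet_neg_one_append {α : Type} (ys : List α) (z : α) :
    PySem.List.pyGet? (ys ++ [z]) (-1) = some z := by
  have h := PySem.List.pyGet?_neg_ofNat (ys ++ [z]) 1 (by omega) (by simp)
  simp only [h, List.length_append, List.length_cons, List.length_nil]
  simp

-- A's loop from index 1 on, with a nonempty accumulator whose last element is `last`.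
theorem pvFoldA (s : List Char) (xs : List (List Char)) :
    ∀ (j : Int), 0 < j → ∀ (acc : List (List Char)) (last : List Char),
      PySem.List.pyGet? acc (-1) = some last →
      (PySem.List.enumerate xs j).foldl
        (fun out ip =>
          if ip.1 = 0 then out ++ [ip.2]
          else out ++ [((PySem.List.pyGet? out (-1)).getD []) ++ s ++ ip.2]) acc
        = acc ++ pvPrefixes s (last ++ s) xs := by
  induction xs with
  | nil => intro j hj acc last hacc; simp [PySem.List.enumerate, pvPrefixes]
  | cons x t ih =>
    intro j hj acc last hacc
    have hj0 : ¬ (j = 0) := by omega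
    have hstep : (if ((j, x) : Int × List Char).1 = 0 then acc ++ [(j, x).2]
        else acc ++ [((PySem.List.pyGet? acc (-1)).getD []) ++ s ++ (j, x).2])
        = acc ++ [last ++ s ++ x] := by simp [hj0, hacc]
    rw [PySem.List.enumerate_cons, List.foldl_cons, hstep,
      ih (j + 1) (by omega) (acc ++ [last ++ s ++ x]) (last ++ s ++ x)
        (pvPyGet_neg_one_append acc (last ++ s ++ x))]
    simp [pvPrefixes, List.append_assoc]

-- B's comprehension equals the same prefixes, for any left context `pre`.
theorem pvMapB (s : List Char) (xs : List (List Char)) :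
    ∀ (pre : List Char),
      (List.range xs.length).map (fun k => pre ++ PySem.Chars.join s (xs.take (k + 1)))
        = pvPrefixes s pre xs := by
  induction xs with
  | nil => intro pre; simp [pvPrefixes]
  | cons x t ih =>
    intro pre
    rw [List.length_cons, List.range_succ_eq_map, List.map_cons, List.map_map]
    simp only [List.take_succ_cons, List.take_zero, PySem.Chars.join_singleton]
    rw [pvPrefixes]
    congr 1
    rw [← ih (pre ++ x ++ s)]
    cases t with
    | nil => simp
    | cons y r =>
      refine List.map_congr_left (fun k _ => ?_)
      simp only [Function.comp, Nat.succ_eq_add_one, List.take_succ_cons,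
        PySem.Chars.join_cons_cons, List.append_assoc]

-- The two loop shapes agree for every parts list.
theorem pvCore (s : List Char) (parts : List (List Char)) :
    (PySem.List.enumerate parts).foldl
      (fun out ip =>
        if ip.1 = 0 then out ++ [ip.2]
        else out ++ [((PySem.List.pyGet? out (-1)).getD []) ++ s ++ ip.2]) []
      = (List.range parts.length).map (fun k => PySem.Chars.join s (parts.take (k + 1))) := by
  have hB : (List.range parts.length).map (fun k => PySem.Chars.join s (parts.take (k + 1)))
      = pvPrefixes s [] parts := by
    have := pvMapB s parts []
    simpa using this
  rw [hB]
  cases parts with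
  | nil => simp [PySem.List.enumerate, pvPrefixes]
  | cons x t =>
    have hstep : (if (((0 : Int), x) : Int × List Char).1 = 0 then [] ++ [((0 : Int), x).2]
        else [] ++ [((PySem.List.pyGet? [] (-1)).getD []) ++ s ++ ((0 : Int), x).2])
        = [x] := by simp
    rw [PySem.List.enumerate_cons, List.foldl_cons, hstep,
      show (0 : Int) + 1 = 1 by norm_num,
      pvFoldA s t 1 (by omega) [x] x
        (by simpa using pvPyGet_neg_one_append ([] : List (List Char)) x)]
    simp [pvPrefixes]

-- ===== VERDICT (by name: the statement is the Claim_ definition above) =====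
theorem path_to_hierarchy_spec : Claim_equal_path_to_hierarchy := by
  intro p sep _ _
  unfold Spec_path_to_hierarchy
  simp only [path_to_hierarchy, path_to_hierarchy_alt]
  rw [pvCore, PySem.List.pyRange_zero_natCast, List.map_map, List.map_map]
  refine List.map_congr_left (fun k _ => ?_)
  simp only [Function.comp]
  rw [show ((k : Int) + 1) = ((k + 1 : Nat) : Int) by push_cast; ring,
    PySem.List.slice_to_natCast]
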